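-- pv_equiv track=rewrite | github.com/GanschowJosh/LatinSquareTools | latin_square_tools.py | has_two_cycles
-- ===== SOURCE A (Python) =====
-- def has_two_cycles(row1, row2):
--     """
--     Checks if the given two rows form only 2-cycles
--     Parameters:
--         row1 (list): A list of elements
--         row2 (list): A list of elements
--     Returns:
--         bool: True if the two rows form only 2-cycles, False otherwise
--     """
--     # Create a mapping from elements in row1 to row2.
--     mapping = {a: b for a, b in zip(row1, row2)}
--     for a in mapping:
--         # Check for a fixed point
--         if mapping[a] == a:
--             return False
--         # Check that applying the mapping twice returns to the original element.
--         if mapping.get(mapping[a]) != a: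
--             return False
--     return True
-- ===== SOURCE B (Python) =====
-- def has_two_cycles(row1, row2):
--     # Different algorithm: canonicalize each mapping pair (a, b) to the
--     # unordered edge (min, max) and count edge multiplicities in one pass.
--     # Since dict keys are distinct, each unordered edge can occur at most
--     # twice; the mapping forms only 2-cycles iff there is no fixed point
--     # and every edge is counted exactly twice (both directions present).
--     mapping = {a: b for a, b in zip(row1, row2)}
--     count = {}
--     for a, b in mapping.items():
--         if a == b:
--             return False
--         e = (a, b) if a < b else (b, a)
--         count[e] = count.get(e, 0) + 1
--     return all(c == 2 for c in count.values())
-- ===== Notes on version B (the rewrite author's own statement) =====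
-- stated objective: alternative
-- what changed: Instead of chasing each key through the dict twice (mapping[mapping[a]] == a), B canonicalizes every mapping pair to an unordered edge (min, max), counts edge multiplicities in one pass, and accepts iff there is no fixed point and every edge is counted exactly twice.
import Mathlib
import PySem

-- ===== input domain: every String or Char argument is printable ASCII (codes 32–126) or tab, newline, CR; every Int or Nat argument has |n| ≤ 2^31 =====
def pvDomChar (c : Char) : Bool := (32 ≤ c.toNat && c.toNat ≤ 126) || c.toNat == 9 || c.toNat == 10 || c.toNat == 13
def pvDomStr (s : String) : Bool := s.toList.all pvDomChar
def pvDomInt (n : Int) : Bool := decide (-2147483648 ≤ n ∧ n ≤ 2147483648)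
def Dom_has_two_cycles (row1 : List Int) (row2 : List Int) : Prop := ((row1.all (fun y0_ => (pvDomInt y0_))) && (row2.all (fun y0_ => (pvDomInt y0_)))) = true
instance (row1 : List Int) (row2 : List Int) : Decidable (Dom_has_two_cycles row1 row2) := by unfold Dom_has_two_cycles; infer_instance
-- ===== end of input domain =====

-- B replaces A's per-key double-lookup chase with a one-pass multiplicity count
-- of canonicalized unordered edges (accept iff no fixed point and every edge
-- counted exactly twice); objective: alternative, same asymptotic cost.

-- ===== PORT A =====
-- 'for a in mapping: …' with early returns, iterating the dict's keys
def htcLoop (m : PySem.Dict Int Int) : List Int → Bool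
  | [] => true
  | a :: rest =>
    match m.get? a with
    | none => false       -- unreachable: a ranges over m's own keys (mapping[a] cannot raise)
    | some b =>
      if b == a then false
      else if m.get? b == some a then htcLoop m rest
      else false

def has_two_cycles (row1 : List Int) (row2 : List Int) : Bool :=
  let mapping := (row1.zip row2).foldl (fun d p => d.insert p.1 p.2) PySem.Dict.empty
  htcLoop mapping mapping.keys

-- ===== PORT B =====
-- e = (a, b) if a < b else (b, a)
def htcCanon (p : Int × Int) : Int × Int := if p.1 < p.2 then p else (p.2, p.1)

-- 'for a, b in mapping.items(): …' building the edge counter, then the final all()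
def htcAltLoop : List (Int × Int) → PySem.Dict (Int × Int) Int → Bool
  | [], count => count.values.all (fun c => c == 2)
  | p :: rest, count =>
    if p.1 == p.2 then false
    else htcAltLoop rest (count.insert (htcCanon p) (count.getD (htcCanon p) 0 + 1))

def has_two_cycles_alt (row1 : List Int) (row2 : List Int) : Bool :=
  let mapping := (row1.zip row2).foldl (fun d p => d.insert p.1 p.2) PySem.Dict.empty
  htcAltLoop mapping.items PySem.Dict.empty

-- ===== PRECONDITION & SPEC =====
def Spec_has_two_cycles (row1 : List Int) (row2 : List Int) (out : Bool) : Prop := out = has_two_cycles_alt row1 row2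
instance (row1 : List Int) (row2 : List Int) (out : Bool) : Decidable (Spec_has_two_cycles row1 row2 out) := by unfold Spec_has_two_cycles; infer_instance

-- ===== CLAIM (what is proved, stated in full; the proofs are below) =====
def Claim_equal_has_two_cycles : Prop := ∀ (row1 : List Int) (row2 : List Int), Dom_has_two_cycles row1 row2 → Spec_has_two_cycles row1 row2 (has_two_cycles row1 row2)

-- ===== LEMMAS AND PROOFS =====

-- A's loop returns true iff every visited key a maps to some b ≠ a with m[b] = a.
theorem htcLoop_eq_true_iff (m : PySem.Dict Int Int) (l : List Int) :
    htcLoop m l = true ↔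
      ∀ a ∈ l, ∃ b, m.get? a = some b ∧ b ≠ a ∧ m.get? b = some a := by
  induction l with
  | nil => simp [htcLoop]
  | cons a rest ih =>
    simp only [htcLoop]
    cases hb : m.get? a with
    | none =>
      simp only [List.mem_cons]
      constructor
      · intro h; cases h
      · intro h
        rcases h a (Or.inl rfl) with ⟨b, hab, _⟩
        rw [hb] at hab; cases hab
    | some b =>
      dsimp only
      by_cases hba : b = a
      · subst hba
        simp only [beq_self_eq_true, if_true, List.mem_cons]
        constructor
        · intro h; cases h
        · intro h
          rcases h b (Or.inl rfl) with ⟨b', hab, hne, _⟩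
          rw [hb] at hab; cases hab; exact absurd rfl hne
      · rw [if_neg (by simpa using hba)]
        by_cases hsym : m.get? b = some a
        · rw [if_pos (by simpa using hsym)]
          rw [ih]
          constructor
          · intro h x hx
            rcases List.mem_cons.1 hx with rfl | hx'
            · exact ⟨b, hb, hba, hsym⟩
            · exact h x hx'
          · intro h x hx; exact h x (List.mem_cons_of_mem a hx)
        · rw [if_neg (by simpa using hsym)]
          constructor
          · intro h; cases h
          · intro h
            rcases h a (List.mem_cons_self) with ⟨b', hab, _, hba'⟩
            rw [hb] at hab; cases hab; exact absurd hba' hsym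

-- B's loop returns true iff no pair is a fixed point and the finished counter's values are all 2.
theorem htcAltLoop_eq_true_iff (l : List (Int × Int)) (c : PySem.Dict (Int × Int) Int) :
    htcAltLoop l c = true ↔
      (∀ p ∈ l, p.1 ≠ p.2) ∧
      ((l.foldl (fun d p => d.insert (htcCanon p) (d.getD (htcCanon p) 0 + 1)) c).values.all
        (fun v => v == 2)) = true := by
  induction l generalizing c with
  | nil => simp [htcAltLoop]
  | cons p rest ih =>
    simp only [htcAltLoop, List.foldl_cons]
    by_cases hfix : p.1 = p.2
    · rw [if_pos (by simpa using hfix)]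
      simp [hfix]
    · rw [if_neg (by simpa using hfix)]
      rw [ih]
      simp only [List.mem_cons]
      constructor
      · rintro ⟨h1, h2⟩
        exact ⟨fun q hq => by rcases hq with rfl | hq'; exact hfix; exact h1 q hq', h2⟩
      · rintro ⟨h1, h2⟩
        exact ⟨fun q hq => h1 q (Or.inr hq), h2⟩

-- counting the two orientations of one edge: under the hypotheses each appears once

-- count in a mapped list is a countP in the original
theorem htc_count_map_eq_countP (l : List (Int × Int)) (f : Int × Int → Int × Int) (e : Int × Int) :
    (l.map f).count e = l.countP (fun p => f p == e) := by
  induction l with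
  | nil => simp
  | cons p rest ih =>
    simp only [List.map_cons, List.count_cons, List.countP_cons, ih]

theorem htcCanon_eq (p : Int × Int) (a b : Int) (hab : a ≠ b) (h : htcCanon p = htcCanon (a, b)) :
    p = (a, b) ∨ p = (b, a) := by
  unfold htcCanon at h
  rcases p with ⟨x, y⟩
  dsimp at h
  split_ifs at h <;> simp_all

theorem htcCanon_swap (a b : Int) (hab : a ≠ b) : htcCanon (b, a) = htcCanon (a, b) := by
  unfold htcCanon
  dsimp
  split_ifs <;> first | rfl | omega

-- a countP whose predicate holds exactly on two distinct values is the sum of their counts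
theorem htc_countP_two (l : List (Int × Int)) (u v : Int × Int) (pred : Int × Int → Bool)
    (huv : u ≠ v) (h : ∀ x, pred x = true ↔ x = u ∨ x = v) :
    l.countP pred = l.count u + l.count v := by
  induction l with
  | nil => simp
  | cons x rest ih =>
    simp only [List.countP_cons, List.count_cons, ih]
    by_cases hxu : x = u
    · subst hxu
      have : pred x = true := (h x).2 (Or.inl rfl)
      simp [this, huv]
      omega
    · by_cases hxv : x = v
      · subst hxv
        have : pred x = true := (h x).2 (Or.inr rfl)
        simp [this, hxu]
        omega
      · have : pred x = false := by
          cases hp : pred x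
          · rfl
          · rcases (h x).1 hp with rfl | rfl
            · exact absurd rfl hxu
            · exact absurd rfl hxv
        simp [this, hxu, hxv]

theorem count_canon_eq_two (I : List (Int × Int)) (hnd : I.Nodup) (a b : Int) (hab : a ≠ b)
    (h1 : (a, b) ∈ I) (h2 : (b, a) ∈ I) :
    (I.map htcCanon).count (htcCanon (a, b)) = 2 := by
  rw [htc_count_map_eq_countP]
  rw [htc_countP_two I (a, b) (b, a) _ (by simp [hab]) ?_]
  · rw [List.count_eq_one_of_mem hnd h1, List.count_eq_one_of_mem hnd h2]
  · intro x
    constructor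
    · intro hx
      exact htcCanon_eq x a b hab (by simpa using hx)
    · rintro (rfl | rfl)
      · simp
      · simp [htcCanon_swap a b hab]

theorem mem_of_count_canon (I : List (Int × Int)) (hnd : I.Nodup) (a b : Int) (hab : a ≠ b)
    (h1 : (a, b) ∈ I) (hc : (I.map htcCanon).count (htcCanon (a, b)) = 2) :
    (b, a) ∈ I := by
  rw [htc_count_map_eq_countP] at hc
  rw [htc_countP_two I (a, b) (b, a) _ (by simp [hab]) ?_] at hc
  · rw [List.count_eq_one_of_mem hnd h1] at hc
    have : I.count (b, a) = 1 := by omega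
    exact List.count_pos_iff.1 (by omega)
  · intro x
    constructor
    · intro hx
      exact htcCanon_eq x a b hab (by simpa using hx)
    · rintro (rfl | rfl)
      · simp
      · simp [htcCanon_swap a b hab]

theorem has_two_cycles_eq (row1 row2 : List Int) :
    has_two_cycles row1 row2 = has_two_cycles_alt row1 row2 := by
  unfold has_two_cycles has_two_cycles_alt
  set m := (row1.zip row2).foldl (fun d p => d.insert p.1 p.2) PySem.Dict.empty with hm
  have hnd : m.keys.Nodup := by
    rw [hm]
    exact PySem.Dict.nodup_keys_foldl_insert_key (row1.zip row2) (fun p => p.1)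
      (fun d p => p.2) PySem.Dict.empty PySem.Dict.nodup_keys_empty
  have hndI : m.items.Nodup := by
    have : (m.items.map (fun p => p.1)).Nodup := hnd
    exact this.of_map
  rw [Bool.eq_iff_iff, htcLoop_eq_true_iff, htcAltLoop_eq_true_iff]
  -- turn the edge-counter fold into counter (items.map canon)
  rw [show (m.items.foldl (fun d p => d.insert (htcCanon p) (d.getD (htcCanon p) 0 + 1))
        PySem.Dict.empty)
      = PySem.Dict.counter (m.items.map htcCanon) by
    rw [← PySem.Dict.foldl_insert_getD_add_one_eq_counter, List.foldl_map]]
  -- the final all() over the counter's values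
  have hvals : ((PySem.Dict.counter (m.items.map htcCanon)).values.all (fun v => v == 2)) = true ↔
      ∀ e ∈ m.items.map htcCanon, (m.items.map htcCanon).count e = 2 := by
    rw [List.all_eq_true]
    constructor
    · intro h e he
      rcases List.mem_map.1 he with ⟨p, hp, rfl⟩
      have hmem : htcCanon p ∈ PySem.Set.ofList (m.items.map htcCanon) :=
        (PySem.Set.mem_ofList _ _).2 (List.mem_map.2 ⟨p, hp, rfl⟩)
      have hv : (((m.items.map htcCanon).count (htcCanon p) : Int))
          ∈ (PySem.Dict.counter (m.items.map htcCanon)).values := by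
        simp only [PySem.Dict.values, PySem.Dict.items_counter, List.map_map]
        exact List.mem_map.2 ⟨htcCanon p, hmem, rfl⟩
      have := h _ hv
      have h2 : ((m.items.map htcCanon).count (htcCanon p) : Int) = 2 := by simpa using this
      exact_mod_cast h2
    · intro h v hv
      simp only [PySem.Dict.values, PySem.Dict.items_counter, List.map_map] at hv
      rcases List.mem_map.1 hv with ⟨k, hk, rfl⟩
      have hk' : k ∈ m.items.map htcCanon := (PySem.Set.mem_ofList _ _).1 hk
      simp [h k hk']
  rw [hvals]
  constructor
  · -- A true → B true
    intro h
    have hget : ∀ p ∈ m.items, m.get? p.1 = some p.2 := fun p hp =>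
      PySem.Dict.get?_of_mem_items m hp hnd
    constructor
    · rintro ⟨a, b⟩ hp
      rcases h a (PySem.Dict.mem_keys_of_mem_items m hp) with ⟨b', hab', hne, _⟩
      have : some b = some b' := by rw [← hget _ hp, hab']
      cases this
      exact fun he => hne he.symm
    · intro e he
      rcases List.mem_map.1 he with ⟨⟨a, b⟩, hp, rfl⟩
      rcases h a (PySem.Dict.mem_keys_of_mem_items m hp) with ⟨b', hab', hne, hba'⟩
      have : some b = some b' := by rw [← hget _ hp, hab']
      cases this
      exact count_canon_eq_two m.items hndI a b (fun he => hne he.symm) hp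
        (PySem.Dict.mem_items_of_get?_eq_some m hba')
  · -- B true → A true
    rintro ⟨hfix, hcnt⟩ a ha
    have ha' : ∃ b, (a, b) ∈ m.items := by
      simp only [PySem.Dict.keys, List.mem_map] at ha
      rcases ha with ⟨⟨a', b⟩, hp, rfl⟩
      exact ⟨b, hp⟩
    rcases ha' with ⟨b, hp⟩
    have hab : a ≠ b := hfix (a, b) hp
    refine ⟨b, PySem.Dict.get?_of_mem_items m hp hnd, Ne.symm hab, ?_⟩
    have hc := hcnt (htcCanon (a, b)) (List.mem_map.2 ⟨(a, b), hp, rfl⟩)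
    exact PySem.Dict.get?_of_mem_items m
      (mem_of_count_canon m.items hndI a b hab hp hc) hnd

-- ===== VERDICT (by name: the statement is the Claim_ definition above) =====
theorem has_two_cycles_spec : Claim_equal_has_two_cycles := by
  intro row1 row2 _
  unfold Spec_has_two_cycles
  exact has_two_cycles_eq row1 row2
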